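-- pv_equiv track=rewrite | github.com/tiagosathler/logic-exercises | hackerrank/prepare/interview_preparation_kits/1_week/day_2/flipping_the_matrix.py | flipping_the_matrix
-- ===== SOURCE A (Python) =====
-- def flipping_the_matrix(matrix: list[list[int]]) -> int:
--     """Flipping The Matrix
--     Args:
--         matrix (list[int]): an matrix of integers
--     """
--     half_size = len(matrix) // 2
--
--     sub_matrix = [[0 for _ in range(half_size)] for _ in range(half_size)]
--
--     for i in range(half_size):
--         for j in range(half_size):
--             sub_matrix[i][j] = max(
--                 matrix[i][j],
--                 matrix[2 * half_size - i - 1][j],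
--                 matrix[i][2 * half_size - j - 1],
--                 matrix[2 * half_size - i - 1][2 * half_size - j - 1],
--             )
--
--     max_sum = sum(sum(row) for row in sub_matrix)
--
--     return max_sum
-- ===== SOURCE B (Python) =====
-- def flipping_the_matrix(matrix: list[list[int]]) -> int:
--     """Flipping The Matrix: one flat pass over every cell of the 2h x 2h part,
--     folding each cell onto its quadrant group key and keeping a dict of
--     per-group running maxima; the answer is the sum of the stored maxima."""
--     n = len(matrix)
--     last = 2 * (n // 2) - 1
--     best = {}
--     for i, row in enumerate(matrix[: last + 1]):
--         for j, v in enumerate(row[: last + 1]):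
--             key = (min(i, last - i), min(j, last - j))
--             best[key] = max(best.get(key, v), v)
--     return sum(best.values())
-- ===== Notes on version B (the rewrite author's own statement) =====
-- stated objective: alternative
-- what changed: Replaces A's nested quadrant loop that reads the four explicit mirror cells per (i,j) into a preallocated sub-matrix by a single flat scan of every cell of the 2h x 2h block that folds each cell onto its quadrant key (min(i,last-i), min(j,last-j)) and maintains a dict of per-group running maxima, returning the sum of the dict's values.
import Mathlib
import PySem

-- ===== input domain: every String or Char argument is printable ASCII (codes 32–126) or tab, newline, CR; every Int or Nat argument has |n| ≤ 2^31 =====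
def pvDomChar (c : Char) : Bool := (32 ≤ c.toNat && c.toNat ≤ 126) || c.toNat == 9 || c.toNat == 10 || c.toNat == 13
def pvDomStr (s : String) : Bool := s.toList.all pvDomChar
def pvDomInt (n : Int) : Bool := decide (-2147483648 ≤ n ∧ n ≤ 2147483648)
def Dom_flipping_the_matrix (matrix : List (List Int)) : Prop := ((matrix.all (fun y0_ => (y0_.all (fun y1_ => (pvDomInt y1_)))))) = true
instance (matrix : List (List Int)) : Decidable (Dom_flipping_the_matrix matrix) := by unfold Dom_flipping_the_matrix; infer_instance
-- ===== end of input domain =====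

-- B replaces A's nested quadrant loop (four explicit mirror-cell reads per (i,j) into a
-- preallocated sub-matrix, summed afterwards) by a single flat scan of every cell of the
-- 2h x 2h block that folds each cell onto its quadrant key and maintains a dict of
-- per-group running maxima; the answer is the sum of the dict's values.

-- ===== PORT A =====
def flipping_the_matrix (matrix : List (List Int)) : Int :=
  let half : Int := PySem.Int.floordiv (PySem.List.len matrix) 2
  let sub0 : List (List Int) :=
    (PySem.List.pyRange 0 half 1).map (fun _ => (PySem.List.pyRange 0 half 1).map (fun _ => (0 : Int)))
  let sub :=
    (PySem.List.pyRange 0 half 1).foldl (fun sm i =>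
      (PySem.List.pyRange 0 half 1).foldl (fun sm j =>
        PySem.List.pySetD sm i (PySem.List.pySetD (PySem.List.pyGetD sm i []) j
          (max (max (max (PySem.List.pyGetD (PySem.List.pyGetD matrix i []) j 0)
                         (PySem.List.pyGetD (PySem.List.pyGetD matrix (2 * half - i - 1) []) j 0))
                    (PySem.List.pyGetD (PySem.List.pyGetD matrix i []) (2 * half - j - 1) 0))
               (PySem.List.pyGetD (PySem.List.pyGetD matrix (2 * half - i - 1) []) (2 * half - j - 1) 0)))) sm) sub0
  (sub.map List.sum).sum

-- ===== PORT B =====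
def flipping_the_matrix_alt (matrix : List (List Int)) : Int :=
  let n : Int := PySem.List.len matrix
  let last : Int := 2 * PySem.Int.floordiv n 2 - 1
  let best : PySem.Dict (Int × Int) Int :=
    (PySem.List.enumerate (PySem.List.slice matrix none (some (last + 1)))).foldl
      (fun best p =>
        (PySem.List.enumerate (PySem.List.slice p.2 none (some (last + 1)))).foldl
          (fun best q =>
            let key : Int × Int := (min p.1 (last - p.1), min q.1 (last - q.1))
            best.insert key (max (best.getD key q.2) q.2))
          best)
      PySem.Dict.empty
  best.values.sum

-- ===== PRECONDITION & SPEC =====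
-- Pre_ excludes exactly the inputs where A raises IndexError: some row among the
-- first 2*(n//2) rows is shorter than 2*(n//2) (a mirror read goes out of range).
def Pre_flipping_the_matrix (matrix : List (List Int)) : Prop :=
  ∀ k < 2 * (matrix.length / 2), 2 * (matrix.length / 2) ≤ (matrix.getD k []).length
instance (matrix : List (List Int)) : Decidable (Pre_flipping_the_matrix matrix) := by
  unfold Pre_flipping_the_matrix; infer_instance
def pvWitness_flipping_the_matrix : List (List Int) := [[112, 42, 83, 119], [56, 125, 56, 49], [15, 78, 101, 43], [62, 98, 114, 108]]

def Spec_flipping_the_matrix (matrix : List (List Int)) (out : Int) : Prop := out = flipping_the_matrix_alt matrix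
instance (matrix : List (List Int)) (out : Int) : Decidable (Spec_flipping_the_matrix matrix out) := by unfold Spec_flipping_the_matrix; infer_instance

-- ===== CLAIM (what is proved, stated in full; the proofs are below) =====
def Claim_equal_flipping_the_matrix : Prop := ∀ (matrix : List (List Int)), Dom_flipping_the_matrix matrix → Pre_flipping_the_matrix matrix → Spec_flipping_the_matrix matrix (flipping_the_matrix matrix)

-- ===== LEMMAS AND PROOFS =====

-- the max of the four mirror cells of group (i, j), exactly as A associates it
def pvF (matrix : List (List Int)) (h i j : Nat) : Int :=
  max (max (max ((matrix.getD i []).getD j 0)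
                ((matrix.getD (2 * h - 1 - i) []).getD j 0))
           ((matrix.getD i []).getD (2 * h - 1 - j) 0))
      ((matrix.getD (2 * h - 1 - i) []).getD (2 * h - 1 - j) 0)

-- the fold key B computes for cell (i, j)
def pvKey (la : Int) (i j : Nat) : Int × Int := (min (i : Int) (la - i), min (j : Int) (la - j))

-- B's per-cell dict update, over a precomputed (key, value) pair
def pvStep (d : PySem.Dict (Int × Int) Int) (p : (Int × Int) × Int) : PySem.Dict (Int × Int) Int :=
  d.insert p.1 (max (d.getD p.1 p.2) p.2)

-- the (key, value) stream of B's flat scan, row-major over the 2h x 2h block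
def pvCells (matrix : List (List Int)) (h : Nat) : List ((Int × Int) × Int) :=
  (List.range (2 * h)).flatMap (fun i =>
    (List.range (2 * h)).map (fun j =>
      (pvKey (2 * (h : Int) - 1) i j, (matrix.getD i []).getD j 0)))

-- the quadrant key list, row-major
def pvQuad (h : Nat) : List (Int × Int) :=
  (List.range h).flatMap (fun (a : Nat) => (List.range h).map (fun (b : Nat) => ((a : Int), (b : Int))))

-- ===== A's side (loop characterisation, as in the quadrant-loop reading) =====

-- writing g j into every position of range' k m overwrites the tail of the row
lemma pv_set_loop {α : Type} (g : Nat → α) :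
    ∀ (m k : Nat) (row : List α), row.length = k + m →
      (List.range' k m).foldl (fun r j => r.set j (g j)) row
        = row.take k ++ (List.range' k m).map g := by
  intro m
  induction m with
  | zero => intro k row hlen; simp [List.take_of_length_le (by omega : row.length ≤ k)]
  | succ m ih =>
    intro k row hlen
    rw [List.range'_succ]
    simp only [List.foldl_cons, List.map_cons]
    rw [ih (k + 1) (row.set k (g k)) (by simp [hlen]; omega)]
    have hk : k < row.length := by omega
    rw [List.take_add_one, List.getElem?_set_self (by simpa using hk)]
    rw [List.take_set]
    rw [List.set_eq_of_length_le (by simp)]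
    simp

-- the inner j-loop only rewrites row i of the state
lemma pv_inner_commute (v : Nat → Int) (i : Nat) :
    ∀ (l : List Nat) (sm : List (List Int)), i < sm.length →
      l.foldl (fun s j => s.set i ((s.getD i []).set j (v j))) sm
        = sm.set i (l.foldl (fun r j => r.set j (v j)) (sm.getD i [])) := by
  intro l
  induction l with
  | nil =>
    intro sm hi
    simp only [List.foldl_nil]
    rw [List.getD_eq_getElem _ _ hi, List.set_getElem_self]
  | cons j l ih =>
    intro sm hi
    simp only [List.foldl_cons]
    rw [ih _ (by simpa using hi), List.set_set]
    congr 2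
    rw [List.getD_eq_getElem _ _ (by simpa using hi), List.getElem_set_self]

-- the full double loop produces the matrix of group maxima
lemma pv_outer_loop (f2 : Nat → Nat → Int) (h : Nat) :
    ∀ (m k : Nat) (sm : List (List Int)), sm.length = k + m → (∀ r ∈ sm, r.length = h) →
      (List.range' k m).foldl
          (fun s i => (List.range' 0 h).foldl (fun s j => s.set i ((s.getD i []).set j (f2 i j))) s) sm
        = sm.take k ++ (List.range' k m).map (fun i => (List.range' 0 h).map (f2 i)) := by
  intro m
  induction m with
  | zero => intro k sm hlen _; simp [List.take_of_length_le (by omega : sm.length ≤ k)]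
  | succ m ih =>
    intro k sm hlen hrows
    rw [List.range'_succ]
    simp only [List.foldl_cons, List.map_cons]
    have hk : k < sm.length := by omega
    rw [pv_inner_commute _ k _ sm hk]
    have hrowlen : (sm.getD k []).length = h := by
      rw [List.getD_eq_getElem _ _ hk]; exact hrows _ (List.getElem_mem hk)
    rw [pv_set_loop _ h 0 _ (by simpa using hrowlen)]
    simp only [List.take_zero, List.nil_append]
    rw [ih (k + 1) _ (by simp; omega) ?_]
    · rw [List.take_add_one, List.getElem?_set_self (by simpa using hk), List.take_set,
        List.set_eq_of_length_le (by simp)]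
      simp
    · intro r hr
      rcases List.mem_or_eq_of_mem_set hr with h1 | h1
      · exact hrows _ h1
      · simp [h1]

-- A computes the double sum of the group maxima
lemma pv_A_eq (matrix : List (List Int)) :
    flipping_the_matrix matrix
      = ((List.range (matrix.length / 2)).map
          (fun i => ((List.range (matrix.length / 2)).map (pvF matrix (matrix.length / 2) i)).sum)).sum := by
  unfold flipping_the_matrix
  simp only [PySem.List.len_eq]
  rw [show ((2:Int)) = ((2:Nat):Int) from rfl, PySem.Int.floordiv_natCast]
  set h := matrix.length / 2 with hh
  rw [PySem.List.pyRange_zero_nat]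
  simp only [List.foldl_map, List.map_map]
  rw [PySem.List.foldl_congr_mem _ _
      (fun s i => (List.range h).foldl (fun s j => s.set i ((s.getD i []).set j (pvF matrix h i j))) s) _ ?_]
  · rw [List.range_eq_range']
    rw [pv_outer_loop (pvF matrix h) h h 0 _ (by simp) (by intro r hr; simp at hr; obtain ⟨_, rfl⟩ := hr; simp)]
    simp [← List.range_eq_range', Function.comp_def]
  · intro sm i hi
    simp only [List.mem_range] at hi
    apply PySem.List.foldl_congr_mem
    intro s j hj
    simp only [List.mem_range] at hj
    have e1 : (((2:Nat):Int) * ((h:Nat):Int) - (i:Nat) - 1) = ((2 * h - 1 - i : Nat):Int) := by omega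
    have e2 : (((2:Nat):Int) * ((h:Nat):Int) - (j:Nat) - 1) = ((2 * h - 1 - j : Nat):Int) := by omega
    rw [e1, e2]
    simp only [PySem.List.pySetD_natCast, PySem.List.pyGetD_natCast]
    rfl

-- ===== B's side: dict-of-maxima characterisation =====

-- lookup after the whole scan = fold of max over the values whose key matches
lemma pv_fold_get? (l : List ((Int × Int) × Int)) :
    ∀ (d : PySem.Dict (Int × Int) Int) (k : Int × Int),
      (l.foldl pvStep d).get? k
        = ((l.filter (fun p => decide (p.1 = k))).map (·.2)).foldl
            (fun o w => some (max (o.getD w) w)) (d.get? k) := by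
  induction l with
  | nil => intro d k; simp
  | cons p l ih =>
    intro d k
    simp only [List.foldl_cons]
    by_cases hp : p.1 = k
    · rw [List.filter_cons_of_pos (by simp [hp]), List.map_cons, List.foldl_cons, ih]
      congr 1
      unfold pvStep
      rw [PySem.Dict.get?_insert, hp, if_pos rfl, PySem.Dict.getD_eq_get?_getD]
    · rw [List.filter_cons_of_neg (by simp [hp]), ih]
      congr 1
      unfold pvStep
      rw [PySem.Dict.get?_insert, if_neg (fun e => hp e.symm)]

-- keys after the scan = the deduplicated key stream, in first-occurrence order
lemma pv_fold_keys (l : List ((Int × Int) × Int)) :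
    (l.foldl pvStep PySem.Dict.empty).keys = PySem.Set.ofList (l.map (·.1)) := by
  have : (l.foldl (fun d p => d.insert p.1 ((fun (d : PySem.Dict (Int × Int) Int) (p : (Int × Int) × Int) => max (d.getD p.1 p.2) p.2) d p)) PySem.Dict.empty).keys
      = PySem.Set.update PySem.Dict.empty.keys (l.map (·.1)) :=
    PySem.Dict.keys_foldl_insert_key l (·.1) _ _
  simpa [pvStep, PySem.Dict.keys_empty, PySem.Set.update_nil_left] using this

lemma pv_fold_keys_nodup (l : List ((Int × Int) × Int)) :
    (l.foldl pvStep PySem.Dict.empty).keys.Nodup := by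
  exact PySem.Dict.nodup_keys_foldl_insert_key l (·.1)
    (fun d p => max (d.getD p.1 p.2) p.2) _ PySem.Dict.nodup_keys_empty

-- filter over a range with no matching index
lemma pv_filter_range_nil (p : Nat → Bool) (N : Nat) (hz : ∀ j < N, p j = false) :
    (List.range N).filter p = [] := by
  rw [List.filter_eq_nil_iff]
  intro a ha
  simp only [List.mem_range] at ha
  simp [hz a ha]

-- filter over a range matching exactly one index
lemma pv_filter_range_one (p : Nat → Bool) (b : Nat) :
    ∀ N, b < N → (∀ j < N, p j = decide (j = b)) → (List.range N).filter p = [b] := by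
  intro N
  induction N with
  | zero => omega
  | succ n ih =>
    intro hb hp
    rw [List.range_succ, List.filter_append]
    by_cases hbn : b = n
    · rw [pv_filter_range_nil p n (fun j hj => by rw [hp j (by omega)]; simp; omega)]
      simp [hp n (by omega), hbn]
    · rw [ih (by omega) (fun j hj => hp j (by omega))]
      simp [hp n (by omega), Ne.symm hbn]

-- filter over a range matching exactly two indices
lemma pv_filter_range_two (p : Nat → Bool) (b c : Nat) (hbc : b < c) :
    ∀ N, c < N → (∀ j < N, p j = (decide (j = b) || decide (j = c))) →
      (List.range N).filter p = [b, c] := by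
  intro N
  induction N with
  | zero => omega
  | succ n ih =>
    intro hc hp
    rw [List.range_succ, List.filter_append]
    by_cases hcn : c = n
    · rw [pv_filter_range_one p b n (by omega)
        (fun j hj => by rw [hp j (by omega)]; simp; omega)]
      simp [hp n (by omega), hcn, show ¬ (n = b) by omega]
    · rw [ih (by omega) (fun j hj => hp j (by omega))]
      simp [hp n (by omega), show ¬ (n = b) by omega, Ne.symm hcn]

-- flatMap over a range whose function vanishes except at one index
lemma pv_flatMap_range_one {α : Type} (F : Nat → List α) (a : Nat) :
    ∀ N, a < N → (∀ i < N, i ≠ a → F i = []) → (List.range N).flatMap F = F a := by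
  intro N
  induction N with
  | zero => omega
  | succ n ih =>
    intro ha hz
    rw [List.range_succ, List.flatMap_append]
    by_cases han : a = n
    · have : (List.range n).flatMap F = [] := by
        apply List.flatMap_eq_nil_iff.mpr
        intro i hi; simp only [List.mem_range] at hi
        exact hz i (by omega) (by omega)
      simp [this, han]
    · rw [ih (by omega) (fun i hi hia => hz i (by omega) hia)]
      simp [hz n (by omega) (Ne.symm han)]

-- flatMap over a range whose function vanishes except at two indices
lemma pv_flatMap_range_two {α : Type} (F : Nat → List α) (a c : Nat) (hac : a < c) :
    ∀ N, c < N → (∀ i < N, i ≠ a → i ≠ c → F i = []) →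
      (List.range N).flatMap F = F a ++ F c := by
  intro N
  induction N with
  | zero => omega
  | succ n ih =>
    intro hc hz
    rw [List.range_succ, List.flatMap_append]
    by_cases hcn : c = n
    · rw [pv_flatMap_range_one F a n (by omega)
        (fun i hi hia => hz i (by omega) hia (by omega))]
      simp [hcn]
    · rw [ih (by omega) (fun i hi => hz i (by omega))]
      simp [hz n (by omega) (by omega) (Ne.symm hcn)]

-- the values of the cell stream whose key is quadrant key (a, b): the four mirror cells
lemma pv_cells_filter (matrix : List (List Int)) (h a b : Nat) (ha : a < h) (hb : b < h) :
    ((pvCells matrix h).filter (fun p => decide (p.1 = ((a : Int), (b : Int))))).map (·.2)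
      = [(matrix.getD a []).getD b 0, (matrix.getD a []).getD (2 * h - 1 - b) 0,
         (matrix.getD (2 * h - 1 - a) []).getD b 0, (matrix.getD (2 * h - 1 - a) []).getD (2 * h - 1 - b) 0] := by
  unfold pvCells
  rw [List.filter_flatMap]
  have key_iff : ∀ i j : Nat, i < 2 * h → j < 2 * h →
      (pvKey (2 * (h : Int) - 1) i j = ((a : Int), (b : Int))
        ↔ ((i = a ∨ i = 2 * h - 1 - a) ∧ (j = b ∨ j = 2 * h - 1 - b))) := by
    intro i j hi hj
    unfold pvKey
    rw [Prod.ext_iff]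
    simp only [min_def]
    constructor
    · intro ⟨h1, h2⟩
      constructor
      · split_ifs at h1 <;> omega
      · split_ifs at h2 <;> omega
    · intro ⟨h1, h2⟩
      constructor
      · split_ifs <;> omega
      · split_ifs <;> omega
  have inner_eq : ∀ i : Nat, i < 2 * h → (i = a ∨ i = 2 * h - 1 - a) →
      ((List.range (2 * h)).map (fun j => (pvKey (2 * (h : Int) - 1) i j, (matrix.getD i []).getD j 0))).filter
          (fun p => decide (p.1 = ((a : Int), (b : Int))))
        = [(pvKey (2 * (h : Int) - 1) i b, (matrix.getD i []).getD b 0),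
           (pvKey (2 * (h : Int) - 1) i (2 * h - 1 - b), (matrix.getD i []).getD (2 * h - 1 - b) 0)] := by
    intro i hi hia
    rw [List.filter_map]
    rw [pv_filter_range_two _ b (2 * h - 1 - b) (by omega) (2 * h) (by omega) ?_]
    · simp
    · intro j hj
      simp only [Function.comp]
      rw [show (decide (j = b) || decide (j = 2 * h - 1 - b))
            = decide (j = b ∨ j = 2 * h - 1 - b) by simp, decide_eq_decide]
      rw [key_iff i j hi hj]
      constructor
      · rintro ⟨_, hcj⟩; exact hcj
      · intro hcj; exact ⟨hia, hcj⟩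
  rw [pv_flatMap_range_two _ a (2 * h - 1 - a) (by omega) (2 * h) (by omega) ?_]
  · rw [inner_eq a (by omega) (Or.inl rfl), inner_eq (2 * h - 1 - a) (by omega) (Or.inr rfl)]
    simp
  · intro i hi hia hic
    apply List.filter_eq_nil_iff.mpr
    intro p hp
    simp only [List.mem_map, List.mem_range] at hp
    obtain ⟨j, hj, rfl⟩ := hp
    simp only [decide_eq_true_eq]
    rw [key_iff i j hi hj]
    rintro ⟨h1, _⟩
    rcases h1 with h1 | h1 <;> omega

-- the dict after the scan holds, at quadrant key (a, b), the max of the four mirror cells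
lemma pv_getD_final (matrix : List (List Int)) (h a b : Nat) (ha : a < h) (hb : b < h) :
    ((pvCells matrix h).foldl pvStep PySem.Dict.empty).getD ((a : Int), (b : Int)) 0
      = pvF matrix h a b := by
  rw [PySem.Dict.getD_eq_get?_getD, pv_fold_get?, PySem.Dict.get?_empty,
    pv_cells_filter matrix h a b ha hb]
  simp only [List.foldl_cons, List.foldl_nil, Option.getD_some, Option.getD_none]
  unfold pvF
  ac_rfl

-- the quadrant key list, as plain existentials
lemma pv_mem_quad (h : Nat) (k : Int × Int) :
    k ∈ pvQuad h ↔ ∃ a b : Nat, a < h ∧ b < h ∧ k = ((a : Int), (b : Int)) := by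
  unfold pvQuad
  constructor
  · intro hmem
    obtain ⟨a, ha, hk⟩ := List.mem_flatMap.mp hmem
    obtain ⟨b, hb, rfl⟩ := List.mem_map.mp hk
    exact ⟨a, b, List.mem_range.mp ha, List.mem_range.mp hb, rfl⟩
  · rintro ⟨a, b, ha, hb, rfl⟩
    exact List.mem_flatMap.mpr ⟨a, List.mem_range.mpr ha,
      List.mem_map.mpr ⟨b, List.mem_range.mpr hb, rfl⟩⟩

-- the key stream of the scan, as plain existentials
lemma pv_mem_cells (matrix : List (List Int)) (h : Nat) (k : Int × Int) :
    k ∈ (pvCells matrix h).map (·.1)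
      ↔ ∃ i j : Nat, i < 2 * h ∧ j < 2 * h ∧ k = pvKey (2 * (h : Int) - 1) i j := by
  unfold pvCells
  rw [List.map_flatMap]
  constructor
  · intro hmem
    obtain ⟨i, hi, hk⟩ := List.mem_flatMap.mp hmem
    rw [List.map_map] at hk
    obtain ⟨j, hj, rfl⟩ := List.mem_map.mp hk
    exact ⟨i, j, List.mem_range.mp hi, List.mem_range.mp hj, rfl⟩
  · rintro ⟨i, j, hi, hj, rfl⟩
    refine List.mem_flatMap.mpr ⟨i, List.mem_range.mpr hi, ?_⟩
    rw [List.map_map]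
    exact List.mem_map.mpr ⟨j, List.mem_range.mpr hj, rfl⟩

-- membership in the scanned key stream = membership in the quadrant key list
lemma pv_keys_mem (matrix : List (List Int)) (h : Nat) (k : Int × Int) :
    k ∈ (pvCells matrix h).map (·.1) ↔ k ∈ pvQuad h := by
  rw [pv_mem_cells, pv_mem_quad]
  constructor
  · rintro ⟨i, j, hi, hj, rfl⟩
    refine ⟨if i < h then i else 2 * h - 1 - i, if j < h then j else 2 * h - 1 - j,
      by split_ifs <;> omega, by split_ifs <;> omega, ?_⟩
    unfold pvKey
    rw [Prod.ext_iff]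
    refine ⟨?_, ?_⟩
    · simp only [min_def]; split_ifs <;> omega
    · simp only [min_def]; split_ifs <;> omega
  · rintro ⟨a, b, ha, hb, rfl⟩
    refine ⟨a, b, by omega, by omega, ?_⟩
    unfold pvKey
    rw [Prod.ext_iff]
    refine ⟨?_, ?_⟩
    · simp only [min_def]; split_ifs <;> omega
    · simp only [min_def]; split_ifs <;> omega

-- the quadrant key list has no duplicates
lemma pv_quad_nodup (h : Nat) : (pvQuad h).Nodup := by
  have hq : pvQuad h = ((List.range h).product (List.range h)).map
      (fun p => ((p.1 : Int), (p.2 : Int))) := by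
    unfold pvQuad
    simp [List.product, List.map_flatMap, List.map_map, Function.comp_def]
  rw [hq]
  refine List.Nodup.map ?_ (List.Nodup.product List.nodup_range List.nodup_range)
  intro p q hpq
  have h1 := congrArg Prod.fst hpq
  have h2 := congrArg Prod.snd hpq
  simp only at h1 h2
  exact Prod.ext (by exact_mod_cast h1) (by exact_mod_cast h2)

-- sum over the quadrant key list of the group maxima = A's double sum
lemma pv_quad_sum (matrix : List (List Int)) (h : Nat) :
    ((pvQuad h).map (fun k => ((pvCells matrix h).foldl pvStep PySem.Dict.empty).getD k 0)).sum
      = ((List.range h).map (fun i => ((List.range h).map (pvF matrix h i)).sum)).sum := by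
  unfold pvQuad
  rw [List.map_flatMap]
  rw [List.flatMap_def, List.sum_flatten, List.map_map]
  apply congrArg List.sum
  apply List.map_congr_left
  intro a ha
  simp only [List.mem_range] at ha
  simp only [Function.comp, List.map_map]
  apply congrArg List.sum
  apply List.map_congr_left
  intro b hb
  simp only [List.mem_range] at hb
  exact pv_getD_final matrix h a b ha hb

-- B equals the dict fold over the flat cell stream
lemma pv_B_eq_cells (matrix : List (List Int)) (hpre : Pre_flipping_the_matrix matrix) :
    flipping_the_matrix_alt matrix
      = ((pvCells matrix (matrix.length / 2)).foldl pvStep PySem.Dict.empty).values.sum := by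
  unfold flipping_the_matrix_alt
  simp only [PySem.List.len_eq]
  rw [show ((2:Int)) = ((2:Nat):Int) from rfl, PySem.Int.floordiv_natCast]
  set h := matrix.length / 2 with hh
  have hN : 2 * h ≤ matrix.length := by omega
  have e1 : ((2:Nat):Int) * ((h:Nat):Int) - 1 + 1 = ((2 * h : Nat) : Int) := by push_cast; ring
  rw [e1, PySem.List.slice_to_natCast]
  rw [PySem.List.enumerate_eq_map_pyRange _ ([] : List Int)]
  simp only [PySem.List.len_eq, List.length_take, show min (2 * h) matrix.length = 2 * h by omega]
  rw [PySem.List.pyRange_zero_nat]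
  simp only [List.foldl_map]
  unfold pvCells
  rw [List.foldl_flatMap]
  refine congrArg (fun d : PySem.Dict (Int × Int) Int => d.values.sum) ?_
  apply PySem.List.foldl_congr_mem
  intro d i hi
  simp only [List.mem_range] at hi
  have hrow : PySem.List.pyGetD (List.take (2 * h) matrix) ((i : Nat) : Int) [] = matrix.getD i [] := by
    rw [PySem.List.pyGetD_natCast]
    simp only [List.getD, List.getElem?_take]
    rw [if_pos hi]
  rw [hrow]
  have hlenrow : 2 * h ≤ (matrix.getD i []).length := hpre i (by omega)
  rw [PySem.List.slice_to_natCast]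
  rw [PySem.List.enumerate_eq_map_pyRange _ (0 : Int)]
  simp only [PySem.List.len_eq, List.length_take,
    show min (2 * h) (matrix.getD i []).length = 2 * h by omega]
  rw [PySem.List.pyRange_zero_nat]
  simp only [List.foldl_map]
  apply PySem.List.foldl_congr_mem
  intro d' j hj
  simp only [List.mem_range] at hj
  have hv : PySem.List.pyGetD (List.take (2 * h) (matrix.getD i [])) ((j : Nat) : Int) 0
      = (matrix.getD i []).getD j 0 := by
    rw [PySem.List.pyGetD_natCast]
    simp only [List.getD, List.getElem?_take]
    rw [if_pos hj]
  rw [hv]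
  rfl

-- B computes the same double sum as A
lemma pv_B_eq (matrix : List (List Int)) (hpre : Pre_flipping_the_matrix matrix) :
    flipping_the_matrix_alt matrix
      = ((List.range (matrix.length / 2)).map
          (fun i => ((List.range (matrix.length / 2)).map (pvF matrix (matrix.length / 2) i)).sum)).sum := by
  rw [pv_B_eq_cells matrix hpre]
  rw [PySem.Dict.values_eq_map_keys _ (pv_fold_keys_nodup (pvCells matrix (matrix.length / 2))) 0]
  have hperm : ((pvCells matrix (matrix.length / 2)).foldl pvStep PySem.Dict.empty).keys.Perm
      (pvQuad (matrix.length / 2)) := by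
    rw [List.perm_ext_iff_of_nodup (pv_fold_keys_nodup _) (pv_quad_nodup _)]
    intro k
    rw [pv_fold_keys, PySem.Set.mem_ofList]
    exact pv_keys_mem _ _ k
  rw [(hperm.map _).sum_eq]
  exact pv_quad_sum matrix _

-- ===== VERDICT (by name: the statement is the Claim_ definition above) =====
theorem flipping_the_matrix_spec : Claim_equal_flipping_the_matrix := by
  intro matrix _ hpre
  unfold Spec_flipping_the_matrix
  rw [pv_A_eq, pv_B_eq matrix hpre]
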